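-- pv_equiv track=rewrite | github.com/asappresearch/halugen | detection/data_preprocessing_opendialkg.py | add_spaces_to_repeated_substrings
-- ===== SOURCE A (Python) =====
-- def add_spaces_to_repeated_substrings(sentence):
--     """
--     This function is used to resolve the formatting issue of HaluEval dataset where the knowledge source is
--     concatenated without any separation marker.
--     """
--     i = 0
--
--     # Initialize a list to hold the characters of the modified sentence
--     modified_sentence_chars = []
--
--     # Iterate through the sentence while the index is less than the length of the sentence
--     while i < len(sentence):
--         # Initialize a flag to indicate if a repetition was found
--         repetition_found = False
--
--         # Try all possible lengths for the repeated substring, starting from 1 to the maximum possible length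
--         for length in range(5, (len(sentence) - i)//2 + 1):
--             # Extract the substring of the current length starting at the current index
--             substring = sentence[i:i+length]
--
--             # Check if the substring is immediately repeated
--             if sentence.startswith(substring, i + length):
--                 # If a repetition is found, append a space before and after the repeated substring
--                 # Only append a space before if it's not the start of the string
--                 modified_sentence_chars.append(substring)
--                 modified_sentence_chars.append('. ')
--                 modified_sentence_chars.append(substring)
--
--                 # Update the index to jump past the repeated substring
--                 i += 2*length
--                 repetition_found = True
--                 break
--
--         # If no repetition was found for any length, just add the current character and move to the next one
--         if not repetition_found:
--             modified_sentence_chars.append(sentence[i])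
--             i += 1
--
--     # Convert the list of characters back into a final modified sentence
--     modified_sentence = ''.join(modified_sentence_chars)
--     return modified_sentence
-- ===== SOURCE B (Python) =====
-- def add_spaces_to_repeated_substrings(sentence):
--     """O(n^2) re-implementation: a backward DP over longest-common-extension rows
--     (lce[i][j] = length of longest common prefix of sentence[i:] and sentence[j:])
--     precomputes, for each position i, the smallest length L >= 5 such that the
--     substring of length L at i is immediately repeated; the forward pass then
--     just reads the precomputed answers."""
--     n = len(sentence)
--     nxt = [0] * (n + 1)                      # lce row for index i+1 (row n = all zeros)
--     best = []                                # best[0] will hold the answer for index i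
--     for i in range(n - 1, -1, -1):
--         ci = sentence[i]
--         cur = [(nxt[j + 1] + 1) if (j < n and sentence[j] == ci) else 0
--                for j in range(n + 1)]
--         b = 0
--         for L in range(5, (n - i) // 2 + 1):
--             if cur[i + L] >= L:
--                 b = L
--                 break
--         best.insert(0, b)
--         nxt = cur
--     parts = []
--     i = 0
--     while i < n:
--         L = best[i]
--         if L:
--             sub = sentence[i:i + L]
--             parts.append(sub + '. ' + sub)
--             i += 2 * L
--         else:
--             parts.append(sentence[i])
--             i += 1
--     return ''.join(parts)
-- ===== Notes on version B (the rewrite author's own statement) =====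
-- stated objective: alternative
-- what changed: A rescans for each position every candidate length with a fresh slice+startswith comparison (worst-case cubic scanning); B precomputes all longest-common-extension values with a backward dynamic-programming pass, storing for every position the smallest immediately-repeated length >= 5, so the forward pass only reads precomputed answers.
import Mathlib
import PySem

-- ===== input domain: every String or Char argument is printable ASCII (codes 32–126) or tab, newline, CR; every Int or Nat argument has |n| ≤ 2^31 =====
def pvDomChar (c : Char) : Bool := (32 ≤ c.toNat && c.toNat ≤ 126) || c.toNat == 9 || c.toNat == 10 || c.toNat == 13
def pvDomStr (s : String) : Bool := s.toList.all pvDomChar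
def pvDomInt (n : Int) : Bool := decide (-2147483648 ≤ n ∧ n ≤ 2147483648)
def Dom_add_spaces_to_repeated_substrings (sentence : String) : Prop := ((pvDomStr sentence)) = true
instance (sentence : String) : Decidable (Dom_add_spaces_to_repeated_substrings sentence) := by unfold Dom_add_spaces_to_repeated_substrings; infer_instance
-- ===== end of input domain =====

-- B replaces A's per-position rescan of candidate repeated substrings (slice + startswith for every
-- candidate length) by a backward longest-common-extension DP that precomputes, for every position,
-- the smallest immediately-repeated length >= 5; objective: alternative algorithm (not measured faster).

-- ===== PORT A =====
-- A's inner `for length in range(5, (len(sentence)-i)//2 + 1): ... break`: first length whose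
-- substring is immediately repeated.  `sentence.startswith(substring, i+length)` is ported as
-- Chars.startswith on the suffix `cs.drop (i+length)` — exact for the nonnegative start index
-- i+length used here (Python compares sub against s[start:start+len(sub)] within s).
def findA (cs : List Char) (i : Nat) : Option Nat :=
  (List.range' 5 ((cs.length - i) / 2 + 1 - 5)).find? (fun L =>
    PySem.Chars.startswith (cs.drop (i + L))
      (PySem.List.slice cs (some (i : Int)) (some ((i + L : Nat) : Int))))

-- needed by loopA's termination proof
theorem findA_ge (cs : List Char) (i L : Nat) (h : findA cs i = some L) : 5 ≤ L := by
  have hm := List.mem_of_find?_eq_some h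
  have := List.mem_range'_1.mp hm
  omega

-- A's outer `while i < len(sentence)` loop, accumulating the parts list.
def loopA (cs : List Char) (i : Nat) (acc : List (List Char)) : List (List Char) :=
  if h : i < cs.length then
    match hf : findA cs i with
    | some L =>
        let sub := PySem.List.slice cs (some (i : Int)) (some ((i + L : Nat) : Int))
        loopA cs (i + 2 * L) (acc ++ [sub, ['.', ' '], sub])
    | none => loopA cs (i + 1) (acc ++ [[cs[i]]])
  else acc
termination_by cs.length - i
decreasing_by
  · have := findA_ge cs i L hf; omega
  · omega

def add_spaces_to_repeated_substrings (sentence : String) : String :=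
  String.ofList (PySem.Chars.join [] (loopA sentence.toList 0 []))

-- ===== PORT B =====
-- cur = [(nxt[j+1] + 1) if (j < n and sentence[j] == ci) else 0 for j in range(n + 1)]
def lceRowB (cs : List Char) (i : Nat) (nxt : List Nat) : List Nat :=
  (List.range (cs.length + 1)).map (fun j =>
    if j < cs.length && (cs.getD j ' ' == cs.getD i ' ') then nxt.getD (j + 1) 0 + 1 else 0)

-- b = 0; for L in range(5, (n-i)//2 + 1): if cur[i+L] >= L: b = L; break
def findRepB (cur : List Nat) (n i : Nat) : Nat :=
  ((List.range' 5 ((n - i) / 2 + 1 - 5)).find? (fun L => decide (L ≤ cur.getD (i + L) 0))).getD 0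

-- the backward `for i in range(n-1, -1, -1)` pass; argument m = number of rows already built,
-- i.e. after m steps the current row belongs to index n-m and best holds indices n-m .. n-1
-- (best.insert(0, b) is the cons).
def buildB (cs : List Char) : Nat → List Nat × List Nat
  | 0 => (List.replicate (cs.length + 1) 0, [])
  | m + 1 =>
      let p := buildB cs m
      let i := cs.length - (m + 1)
      let cur := lceRowB cs i p.1
      (cur, findRepB cur cs.length i :: p.2)

-- the forward `while i < n` loop reading the precomputed best lengths.
def loopB (cs : List Char) (best : List Nat) (i : Nat) (acc : List (List Char)) : List (List Char) :=
  if h : i < cs.length then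
    let L := best.getD i 0
    if hL : L ≠ 0 then
      let sub := PySem.List.slice cs (some (i : Int)) (some ((i + L : Nat) : Int))
      loopB cs best (i + 2 * L) (acc ++ [sub ++ '.' :: ' ' :: sub])
    else loopB cs best (i + 1) (acc ++ [[cs[i]]])
  else acc
termination_by cs.length - i
decreasing_by
  · have hL' : best.getD i 0 ≠ 0 := hL
    simp only [List.getD] at hL'
    omega
  · omega

def add_spaces_to_repeated_substrings_alt (sentence : String) : String :=
  String.ofList (PySem.Chars.join []
    (loopB sentence.toList (buildB sentence.toList sentence.toList.length).2 0 []))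

-- ===== PRECONDITION & SPEC =====
def Spec_add_spaces_to_repeated_substrings (sentence : String) (out : String) : Prop := out = add_spaces_to_repeated_substrings_alt sentence
instance (sentence : String) (out : String) : Decidable (Spec_add_spaces_to_repeated_substrings sentence out) := by unfold Spec_add_spaces_to_repeated_substrings; infer_instance

-- ===== CLAIM (what is proved, stated in full; the proofs are below) =====
def Claim_equal_add_spaces_to_repeated_substrings : Prop := ∀ (sentence : String), Dom_add_spaces_to_repeated_substrings sentence → Spec_add_spaces_to_repeated_substrings sentence (add_spaces_to_repeated_substrings sentence)

-- ===== LEMMAS AND PROOFS =====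

-- mathematical longest common extension: lceM cs i j = largest k with cs[i:i+k] = cs[j:j+k] inside cs
def lceM (cs : List Char) (i j : Nat) : Nat :=
  if i < cs.length && j < cs.length && (cs.getD j ' ' == cs.getD i ' ') then
    lceM cs (i + 1) (j + 1) + 1
  else 0
termination_by cs.length - i
decreasing_by
  have : i < cs.length := by
    rename_i h; simp only [Bool.and_eq_true, decide_eq_true_eq] at h; exact h.1.1
  omega

theorem lceM_ge_iff (cs : List Char) (L i j : Nat) (hi : i + L ≤ cs.length) (hj : j + L ≤ cs.length) :
    L ≤ lceM cs i j ↔ (cs.drop i).take L = (cs.drop j).take L := by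
  induction L generalizing i j with
  | zero => simp
  | succ L ih =>
      have hi' : i < cs.length := by omega
      have hj' : j < cs.length := by omega
      rw [List.drop_eq_getElem_cons hi', List.drop_eq_getElem_cons hj']
      simp only [List.take_succ_cons, List.cons.injEq]
      rw [lceM]
      by_cases hc : cs[j] = cs[i]
      · rw [if_pos (by rw [List.getD_eq_getElem cs ' ' hj', List.getD_eq_getElem cs ' ' hi', hc]
                       simp [hi', hj'])]
        constructor
        · intro h; exact ⟨hc.symm, (ih (i+1) (j+1) (by omega) (by omega)).mp (by omega)⟩
        · intro ⟨_, h2⟩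
          have := (ih (i+1) (j+1) (by omega) (by omega)).mpr h2
          omega
      · rw [if_neg (by rw [List.getD_eq_getElem cs ' ' hj', List.getD_eq_getElem cs ' ' hi']
                       simp [hc])]
        constructor
        · omega
        · intro ⟨h1, _⟩; exact absurd h1.symm hc

-- row m of the backward pass is the lce row for index n - m
theorem buildB_fst (cs : List Char) (m : Nat) (hm : m ≤ cs.length) (j : Nat) :
    ((buildB cs m).1).getD j 0 = lceM cs (cs.length - m) j := by
  induction m generalizing j with
  | zero =>
      rw [lceM]
      simp [buildB, List.getD]
  | succ m ih =>
      have hi : cs.length - (m + 1) < cs.length := by omega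
      have hstep : cs.length - (m + 1) + 1 = cs.length - m := by omega
      rw [lceM]
      simp only [buildB, lceRowB]
      by_cases hj : j < cs.length + 1
      · rw [List.getD_eq_getElem _ _ (by simpa using hj)]
        simp only [List.getElem_map, List.getElem_range]
        rw [ih (by omega) (j + 1), hstep]
        by_cases hjn : j < cs.length
        · simp [hi, hjn]
        · simp [hjn]
      · rw [List.getD_eq_default _ _ (by simpa using (by omega : ¬ j < cs.length + 1))]
        have : ¬ j < cs.length := by omega
        simp [this]

-- the entry the backward pass stores for index i, expressed through lceM
def bval (cs : List Char) (i : Nat) : Nat :=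
  ((List.range' 5 ((cs.length - i) / 2 + 1 - 5)).find? (fun L =>
    decide (L ≤ lceM cs i (i + L)))).getD 0

theorem buildB_snd (cs : List Char) (m : Nat) (hm : m ≤ cs.length) :
    (buildB cs m).2 = (List.range' (cs.length - m) m).map (bval cs) := by
  induction m with
  | zero => rfl
  | succ m ih =>
      have hstep : cs.length - (m + 1) + 1 = cs.length - m := by omega
      rw [List.range'_succ, hstep]
      simp only [buildB, List.map_cons]
      refine congrArg₂ _ ?_ (ih (by omega))
      unfold findRepB bval
      have hfun : (fun L => decide (L ≤ (lceRowB cs (cs.length - (m + 1)) (buildB cs m).1).getD (cs.length - (m + 1) + L) 0))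
          = fun L => decide (L ≤ lceM cs (cs.length - (m + 1)) (cs.length - (m + 1) + L)) := by
        funext L
        have := buildB_fst cs (m + 1) hm (cs.length - (m + 1) + L)
        simp only [buildB] at this
        rw [this]
      rw [hfun]

theorem find?_congr' {α : Type} (p q : α → Bool) (l : List α) (h : ∀ a ∈ l, p a = q a) :
    l.find? p = l.find? q := by
  induction l with
  | nil => rfl
  | cons x t ih =>
      simp only [List.find?_cons, h x List.mem_cons_self]
      cases q x <;> simp_all

-- B's stored entry agrees with A's inner search (0 encodes "not found"; hits are ≥ 5)
theorem bval_eq_findA (cs : List Char) (i : Nat) :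
    bval cs i = (findA cs i).getD 0 := by
  unfold bval findA
  refine congrArg (fun o => o.getD 0) (find?_congr' _ _ _ fun L hL => ?_)
  have hmem := List.mem_range'_1.mp hL
  have hiL : i + 2 * L ≤ cs.length := by
    have h2 : L ≤ (cs.length - i) / 2 := by omega
    omega
  have hsub : PySem.List.slice cs (some (i : Int)) (some ((i + L : Nat) : Int))
      = (cs.drop i).take L := by
    rw [PySem.List.slice_natCast]
    congr 1
    omega
  have hlen : ((cs.drop i).take L).length = L := by
    simp
    omega
  rw [Bool.eq_iff_iff]
  simp only [decide_eq_true_eq, PySem.Chars.startswith, hsub, List.isPrefixOf_iff_prefix]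
  rw [lceM_ge_iff cs L i (i + L) (by omega) (by omega), List.prefix_iff_eq_take, hlen]

theorem best_getD (cs : List Char) (i : Nat) (h : i < cs.length) :
    ((buildB cs cs.length).2).getD i 0 = (findA cs i).getD 0 := by
  rw [buildB_snd cs cs.length le_rfl, ← bval_eq_findA]
  rw [List.getD_eq_getElem _ _ (by simpa using h)]
  simp [List.getElem_range']

theorem join_nil_eq_flatten (xs : List (List Char)) : PySem.Chars.join [] xs = xs.flatten := by
  induction xs with
  | nil => rfl
  | cons a t ih =>
      simp [PySem.Chars.join, List.intercalate] at ih ⊢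
      cases t <;> simp_all [List.intersperse]

-- the two main loops produce the same joined text
theorem loops_agree (cs : List Char) (i : Nat) (acc acc' : List (List Char))
    (hacc : acc.flatten = acc'.flatten) :
    (loopA cs i acc).flatten = (loopB cs (buildB cs cs.length).2 i acc').flatten := by
  rw [loopA, loopB]
  by_cases h : i < cs.length
  · rw [dif_pos h, dif_pos h]
    cases hfa : findA cs i with
    | some L =>
        have h5 : 5 ≤ L := findA_ge cs i L hfa
        have hb := best_getD cs i h
        rw [hfa] at hb
        simp only [hb, Option.getD_some]
        rw [dif_pos (by omega : ¬ L = 0)]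
        exact loops_agree cs (i + 2 * L) _ _ (by simp [hacc])
    | none =>
        have hb := best_getD cs i h
        rw [hfa] at hb
        simp only [hb, Option.getD_none]
        rw [dif_neg (by omega)]
        exact loops_agree cs (i + 1) _ _ (by simp [hacc])
  · rw [dif_neg h, dif_neg h]; exact hacc
termination_by cs.length - i
decreasing_by
  all_goals omega

-- ===== VERDICT (by name: the statement is the Claim_ definition above) =====
theorem add_spaces_to_repeated_substrings_spec : Claim_equal_add_spaces_to_repeated_substrings := by
  intro s _
  unfold Spec_add_spaces_to_repeated_substrings
  unfold add_spaces_to_repeated_substrings add_spaces_to_repeated_substrings_alt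
  rw [join_nil_eq_flatten, join_nil_eq_flatten, loops_agree s.toList 0 [] [] rfl]
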